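-- pv_equiv track=rewrite | github.com/yj-melissa/solved | 프로그래머스/lv2/131127. 할인 행사/할인 행사.py | solution
-- ===== SOURCE A (Python) =====
-- def solution(want, number, discount):
--     answer = 0
--     want_idx = dict()       # want에 포함된 아이템들의 인덱스
--
--     for i in range(len(want)):
--         want_idx[want[i]] = i
--
--     days = [-1] * len(discount)  # days[i] : i번째 날 할인한 아이템의 인덱스
--     items = [0] * len(want)     # items[0] : 0번째 아이템이 10일 동안 나온 횟수
--
--     for i in range(len(discount)):
--         if (i - 10) >= 0 and days[i - 10] > -1:
--             items[days[i - 10]] -= 1     # 10일 전 할인한 제품 제외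
--
--         if discount[i] in want_idx:     # 할인하는 항목이 원하는 제품이었다면 표시
--             idx = want_idx[discount[i]]
--             items[idx] += 1
--             days[i] = idx
--
--         if items == number:     # 사려고 했던 목록과 숫자를 달성했다면
--             answer += 1
--
--
--     return answer
-- ===== SOURCE B (Python) =====
-- def _bump(number, cnt, bad, j, delta):
--     if cnt[j] == number[j]:
--         bad += 1
--     cnt[j] += delta
--     if cnt[j] == number[j]:
--         bad -= 1
--     return cnt, bad
--
--
-- def solution(want, number, discount):
--     n = len(want)
--     if len(number) != n:
--         return 0          # lists of different lengths can never match
--     pos = {}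
--     for i, w in enumerate(want):
--         pos[w] = i
--     cnt = [0] * n
--     bad = sum(1 for j in range(n) if cnt[j] != number[j])
--     window = []
--     answer = 0
--     for item in discount:
--         if len(window) == 10:
--             old = window.pop(0)
--             if old is not None:
--                 cnt, bad = _bump(number, cnt, bad, old, -1)
--         j = pos.get(item)
--         window.append(j)
--         if j is not None:
--             cnt, bad = _bump(number, cnt, bad, j, 1)
--         if bad == 0:
--             answer += 1
--     return answer
-- ===== Notes on version B (the rewrite author's own statement) =====
-- stated objective: alternative
-- what changed: B replaces A's per-day full list comparison items == number by an incrementally maintained mismatch counter over an explicit sliding window (plus an early return 0 for length-mismatched want/number), trading the O(len(want)) compare per day for O(1) counter updates.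
import Mathlib
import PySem

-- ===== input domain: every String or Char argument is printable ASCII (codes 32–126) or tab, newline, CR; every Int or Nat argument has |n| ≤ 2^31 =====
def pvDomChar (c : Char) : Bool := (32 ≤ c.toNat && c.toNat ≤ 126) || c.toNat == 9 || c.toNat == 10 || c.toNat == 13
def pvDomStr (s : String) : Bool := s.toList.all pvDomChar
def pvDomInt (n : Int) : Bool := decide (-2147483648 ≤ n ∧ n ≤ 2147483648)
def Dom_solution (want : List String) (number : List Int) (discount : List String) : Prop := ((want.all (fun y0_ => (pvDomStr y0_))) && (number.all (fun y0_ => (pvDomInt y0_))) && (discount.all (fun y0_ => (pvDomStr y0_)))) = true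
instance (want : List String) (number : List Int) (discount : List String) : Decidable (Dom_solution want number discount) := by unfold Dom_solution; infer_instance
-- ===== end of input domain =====

-- B replaces A's per-day full list comparison `items == number` by an incrementally
-- maintained mismatch counter over an explicit sliding-window list.

-- ===== PORT A =====
-- one iteration of A's main loop; indices into days/items are always in range
-- (days stores only -1 or valid want-indices), so pyGetD/pySetD are exact here
def solutionStep (number : List Int) (wantIdx : PySem.Dict String Int)
    (discount : List String) (st : Int × List Int × List Int) (i : Int) :
    Int × List Int × List Int :=
  let answer := st.1
  let days := st.2.1
  let items := st.2.2
  let items :=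
    if i - 10 ≥ 0 ∧ PySem.List.pyGetD days (i - 10) (-1) > -1 then
      let j := PySem.List.pyGetD days (i - 10) (-1)
      PySem.List.pySetD items j (PySem.List.pyGetD items j 0 - 1)
    else items
  let d := PySem.List.pyGetD discount i ""
  let st2 :=
    if wantIdx.contains d then
      let idx := wantIdx.getD d 0
      (PySem.List.pySetD days i idx,
       PySem.List.pySetD items idx (PySem.List.pyGetD items idx 0 + 1))
    else (days, items)
  let days := st2.1
  let items := st2.2
  let answer := if items = number then answer + 1 else answer
  (answer, days, items)

def solution (want : List String) (number : List Int) (discount : List String) : Int :=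
  let wantIdx := (PySem.List.pyRange 0 want.length 1).foldl
    (fun d i => d.insert (PySem.List.pyGetD want i "") i) PySem.Dict.empty
  let days := List.replicate discount.length (-1 : Int)
  let items := List.replicate want.length (0 : Int)
  let res := (PySem.List.pyRange 0 discount.length 1).foldl
    (solutionStep number wantIdx discount) ((0 : Int), days, items)
  res.1

-- ===== PORT B =====
-- _bump of Source B; index j is always a valid want-index, so pyGetD/pySetD are exact
def altBump (number cnt : List Int) (bad j delta : Int) : List Int × Int :=
  let bad := if PySem.List.pyGetD cnt j 0 = PySem.List.pyGetD number j 0 then bad + 1 else bad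
  let cnt := PySem.List.pySetD cnt j (PySem.List.pyGetD cnt j 0 + delta)
  let bad := if PySem.List.pyGetD cnt j 0 = PySem.List.pyGetD number j 0 then bad - 1 else bad
  (cnt, bad)

-- one iteration of Source B's main loop; state = (answer, window, cnt, bad)
def altStep (number : List Int) (pos : PySem.Dict String Int)
    (st : Int × List (Option Int) × List Int × Int) (item : String) :
    Int × List (Option Int) × List Int × Int :=
  let answer := st.1
  let window := st.2.1
  let cnt := st.2.2.1
  let bad := st.2.2.2
  let st2 :=
    if window.length = 10 then
      match window with
      | [] => (window, cnt, bad)   -- unreachable (length = 10)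
      | old :: rest =>
        match old with
        | some j =>
          let r := altBump number cnt bad j (-1)
          (rest, r.1, r.2)
        | none => (rest, cnt, bad)
    else (window, cnt, bad)
  let window := st2.1
  let cnt := st2.2.1
  let bad := st2.2.2
  let j? := pos.get? item
  let window := window ++ [j?]
  let st3 :=
    match j? with
    | some j => altBump number cnt bad j 1
    | none => (cnt, bad)
  let cnt := st3.1
  let bad := st3.2
  let answer := if bad = 0 then answer + 1 else answer
  (answer, window, cnt, bad)

def solution_alt (want : List String) (number : List Int) (discount : List String) : Int :=
  let n := want.length
  if number.length ≠ n then 0 else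
  let pos := (PySem.List.enumerate want 0).foldl
    (fun d p => d.insert p.2 p.1) PySem.Dict.empty
  let cnt := List.replicate n (0 : Int)
  let bad := (PySem.List.pyRange 0 n 1).foldl
    (fun acc j => if PySem.List.pyGetD cnt j 0 ≠ PySem.List.pyGetD number j 0 then acc + 1 else acc)
    (0 : Int)
  let res := discount.foldl (altStep number pos) ((0 : Int), ([] : List (Option Int)), cnt, bad)
  res.1

-- ===== PRECONDITION & SPEC =====
def Spec_solution (want : List String) (number : List Int) (discount : List String) (out : Int) : Prop := out = solution_alt want number discount
instance (want : List String) (number : List Int) (discount : List String) (out : Int) : Decidable (Spec_solution want number discount out) := by unfold Spec_solution; infer_instance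

-- ===== CLAIM (what is proved, stated in full; the proofs are below) =====
def Claim_equal_solution : Prop := ∀ (want : List String) (number : List Int) (discount : List String), Dom_solution want number discount → Spec_solution want number discount (solution want number discount)

-- ===== LEMMAS AND PROOFS =====


-- mismatch counter: number of positions where the two lists differ
def badCount : List Int → List Int → Int
  | a :: as, b :: bs => (if a = b then 0 else 1) + badCount as bs
  | _, _ => 0

-- the dictionary A builds (B builds the same one, see posFold_eq_wdict)
def wdict (want : List String) : PySem.Dict String Int :=
  (PySem.List.pyRange 0 want.length 1).foldl
    (fun d i => d.insert (PySem.List.pyGetD want i "") i) PySem.Dict.empty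

def fD (want : List String) (x : String) : Option Int := (wdict want).get? x

def gD (want : List String) (discount : List String) (j : Nat) : Int :=
  (fD want (discount.getD j "")).getD (-1)

def daysAt (want : List String) (discount : List String) (k : Nat) : List Int :=
  (List.range discount.length).map (fun j => if j < k then gD want discount j else -1)

def winAt (want : List String) (discount : List String) (k : Nat) : List (Option Int) :=
  (List.range' (k - 10) (min k 10)).map (fun j => fD want (discount.getD j ""))

theorem badCount_cons (a b : Int) (as bs : List Int) :
    badCount (a :: as) (b :: bs) = (if a = b then 0 else 1) + badCount as bs := rfl

theorem badCount_nonneg (as bs : List Int) : 0 ≤ badCount as bs := by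
  induction as generalizing bs with
  | nil => simp [badCount]
  | cons a as ih =>
    cases bs with
    | nil => simp [badCount]
    | cons b bs => have := ih bs; unfold badCount; split <;> omega

theorem badCount_eq_zero (as bs : List Int) (h : as.length = bs.length) :
    badCount as bs = 0 ↔ as = bs := by
  induction as generalizing bs with
  | nil => cases bs with
    | nil => simp [badCount]
    | cons b bs => simp at h
  | cons a as ih =>
    cases bs with
    | nil => simp at h
    | cons b bs =>
      simp only [List.length_cons, Nat.add_right_cancel_iff] at h
      have h1 := badCount_nonneg as bs
      unfold badCount
      rw [List.cons_eq_cons, ← ih bs h]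
      constructor
      · intro he; constructor
        · by_contra hne; simp [hne] at he; omega
        · split at he <;> omega
      · rintro ⟨rfl, h2⟩; simp [h2]

theorem badCount_set (as bs : List Int) (j : Nat) (v : Int) (hj : j < as.length)
    (hlen : as.length = bs.length) :
    badCount (as.set j v) bs =
      badCount as bs - (if as.getD j 0 = bs.getD j 0 then 0 else 1)
        + (if v = bs.getD j 0 then 0 else 1) := by
  induction as generalizing bs j with
  | nil => simp at hj
  | cons a as ih =>
    cases bs with
    | nil => simp at hlen
    | cons b bs =>
      simp only [List.length_cons, Nat.add_right_cancel_iff] at hlen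
      cases j with
      | zero =>
        simp only [List.set_cons_zero, List.getD_cons_zero]
        unfold badCount
        generalize badCount as bs = t
        split_ifs <;> omega
      | succ j =>
        simp only [List.length_cons, Nat.add_lt_add_iff_right] at hj
        simp only [List.set_cons_succ, List.getD_cons_succ]
        unfold badCount
        rw [ih bs j hj hlen]
        generalize badCount as bs = t
        split_ifs <;> omega

theorem altBump_eq (number cnt : List Int) (bad : Int) (jn : Nat) (delta : Int)
    (hj : jn < cnt.length) (hlen : cnt.length = number.length) :
    altBump number cnt bad (jn : Int) delta =
      (cnt.set jn (cnt.getD jn 0 + delta),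
       bad + badCount (cnt.set jn (cnt.getD jn 0 + delta)) number - badCount cnt number) := by
  unfold altBump
  simp only [PySem.List.pyGetD_natCast, PySem.List.pySetD_natCast]
  have hset : (cnt.set jn (cnt.getD jn 0 + delta)).getD jn 0 = cnt.getD jn 0 + delta := by
    simp [List.getD_eq_getElem?_getD, List.getElem?_set_self hj]
  rw [hset, badCount_set cnt number jn _ hj hlen]
  refine congrArg (Prod.mk _) ?_
  generalize badCount cnt number = t
  split_ifs <;> omega

theorem altBump_eq' (number cnt : List Int) (bad j delta : Int)
    (hj0 : 0 ≤ j) (hj : j < (cnt.length : Int)) (hlen : cnt.length = number.length) :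
    altBump number cnt bad j delta =
      (cnt.set j.toNat (cnt.getD j.toNat 0 + delta),
       bad + badCount (cnt.set j.toNat (cnt.getD j.toNat 0 + delta)) number - badCount cnt number) := by
  obtain ⟨jn, rfl⟩ : ∃ n : Nat, j = (n : Int) := ⟨j.toNat, by omega⟩
  simp only [Int.toNat_natCast]
  exact altBump_eq number cnt bad jn delta (by omega) hlen

theorem foldl_insert_get?_bound (l : List Int) (key : Int → String)
    (d0 : PySem.Dict String Int) (P : Int → Prop)
    (h0 : ∀ x v, d0.get? x = some v → P v) (hl : ∀ i ∈ l, P i) :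
    ∀ x v, ((l.foldl (fun d i => d.insert (key i) i) d0).get? x = some v) → P v := by
  induction l generalizing d0 with
  | nil => exact h0
  | cons i l ih =>
    intro x v hx
    refine ih (d0.insert (key i) i) ?_ (fun j hj => hl j (List.mem_cons_of_mem _ hj)) x v hx
    intro y w hy
    by_cases hk : y = key i
    · subst hk
      rw [PySem.Dict.get?_insert_self] at hy
      cases hy
      exact hl i List.mem_cons_self
    · rw [PySem.Dict.get?_insert_of_ne _ _ hk] at hy
      exact h0 y w hy

theorem wdict_values (want : List String) (x : String) (v : Int)
    (h : (wdict want).get? x = some v) : 0 ≤ v ∧ v < (want.length : Int) := by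
  refine foldl_insert_get?_bound _ _ _ (fun v => 0 ≤ v ∧ v < (want.length : Int)) ?_ ?_ x v h
  · intro y w hy; simp [PySem.Dict.get?_empty] at hy
  · intro i hi
    rw [PySem.List.mem_pyRange_one] at hi
    exact hi

theorem posFold_eq_wdict (want : List String) :
    (PySem.List.enumerate want 0).foldl (fun d p => d.insert p.2 p.1) PySem.Dict.empty
      = wdict want := by
  rw [PySem.List.enumerate_eq_map_pyRange want "", List.foldl_map]
  rfl

theorem daysAt_zero (want discount : List String) :
    daysAt want discount 0 = List.replicate discount.length (-1) := by
  unfold daysAt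
  apply List.ext_getElem
  · simp
  · intro j h1 h2; simp

theorem daysAt_getD (want discount : List String) (k j : Nat)
    (hjm : j < discount.length) (hjk : j < k) :
    (daysAt want discount k).getD j (-1) = gD want discount j := by
  unfold daysAt
  rw [List.getD_eq_getElem?_getD]
  simp [hjm, hjk]

theorem daysAt_succ_none (want discount : List String) (k : Nat)
    (hg : gD want discount k = -1) :
    daysAt want discount (k + 1) = daysAt want discount k := by
  unfold daysAt
  apply List.ext_getElem
  · simp
  · intro j h1 h2
    simp only [List.getElem_map, List.getElem_range]
    by_cases hjk : j = k
    · subst hjk; simp [hg]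
    · simp only [show (j < k + 1) = (j < k) from by simp; omega]

theorem daysAt_succ_set (want discount : List String) (k : Nat) (_hk : k < discount.length) :
    (daysAt want discount k).set k (gD want discount k) = daysAt want discount (k + 1) := by
  unfold daysAt
  apply List.ext_getElem
  · simp
  · intro j h1 h2
    simp only [List.length_set, List.length_map, List.length_range] at h1
    rw [List.getElem_set]
    simp only [List.getElem_map, List.getElem_range]
    by_cases hjk : j = k
    · simp [hjk]
    · simp only [if_neg (by omega : ¬ k = j)]
      simp only [show (j < k + 1) = (j < k) from by simp; omega]

theorem winAt_len (want discount : List String) (k : Nat) :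
    (winAt want discount k).length = min k 10 := by
  simp [winAt]

theorem winAt_zero (want discount : List String) : winAt want discount 0 = [] := by
  simp [winAt]

theorem winAt_cons (want discount : List String) (k : Nat) (hk : 10 ≤ k) :
    winAt want discount k =
      fD want (discount.getD (k - 10) "")
        :: (List.range' (k - 9) 9).map (fun j => fD want (discount.getD j "")) := by
  unfold winAt
  have h1 : min k 10 = 10 := by omega
  have hcons : List.range' (k - 10) 10 = (k - 10) :: List.range' (k - 9) 9 := by
    have h := List.range'_succ (s := k - 10) (n := 9) (step := 1)
    rw [show k - 10 + 1 = k - 9 from by omega] at h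
    exact h
  rw [h1, hcons, List.map_cons]

theorem winAt_succ (want discount : List String) (k : Nat) :
    (List.range' (k - 9) (min k 9)).map (fun j => fD want (discount.getD j ""))
        ++ [fD want (discount.getD k "")]
      = winAt want discount (k + 1) := by
  unfold winAt
  have h2 : k + 1 - 10 = k - 9 := by omega
  have h3 : min (k + 1) 10 = min k 9 + 1 := by omega
  rw [h2, h3, List.range'_1_concat, List.map_append,
    show k - 9 + min k 9 = k from by omega]
  simp

theorem initBad (cnt number : List Int) (c : Int) (hlen : cnt.length = number.length) :
    (List.range cnt.length).foldl
        (fun acc j => if cnt.getD j 0 ≠ number.getD j 0 then acc + 1 else acc) c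
      = c + badCount cnt number := by
  induction cnt generalizing number c with
  | nil =>
    cases number with
    | nil => simp [badCount]
    | cons b bs => simp at hlen
  | cons a as ih =>
    cases number with
    | nil => simp at hlen
    | cons b bs =>
      simp only [List.length_cons, Nat.add_right_cancel_iff] at hlen
      rw [List.length_cons, List.range_succ_eq_map, List.foldl_cons, List.foldl_map]
      simp only [Nat.succ_eq_add_one, List.getD_cons_succ, List.getD_cons_zero]
      rw [ih bs _ hlen, badCount_cons]
      generalize badCount as bs = t
      split_ifs <;> omega

theorem stepA_eq (number : List Int) (wantIdx : PySem.Dict String Int)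
    (discount : List String) (st : Int × List Int × List Int) (i : Int) :
    ∃ days' items', items'.length = st.2.2.length ∧
      solutionStep number wantIdx discount st i
        = ((if items' = number then st.1 + 1 else st.1), days', items') := by
  unfold solutionStep
  refine ⟨_, _, ?_, rfl⟩
  split_ifs <;> simp [PySem.List.length_pySetD]

theorem foldA_const (number : List Int) (wantIdx : PySem.Dict String Int)
    (discount : List String) (l : List Int) :
    ∀ (a : Int) (days items : List Int), items.length ≠ number.length →
      ((l.foldl (solutionStep number wantIdx discount) (a, days, items)).1 = a) := by
  induction l with
  | nil => intro a days items _; rfl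
  | cons i l ih =>
    intro a days items hlen
    obtain ⟨days', items', hlen', heq⟩ := stepA_eq number wantIdx discount (a, days, items) i
    rw [List.foldl_cons, heq,
      if_neg (fun he => hlen (by rw [← hlen', he]))]
    exact ih a days' items' (by rw [hlen']; exact hlen)

-- the items list after A's "remove the item discounted 10 days ago" phase
def dec10 (want discount : List String) (items : List Int) (k : Nat) : List Int :=
  if 10 ≤ k then
    match fD want (discount.getD (k - 10) "") with
    | some j => items.set j.toNat (items.getD j.toNat 0 - 1)
    | none => items
  else items

-- the items list after A's "add today's discounted item" phase
def inc0 (want discount : List String) (items : List Int) (k : Nat) : List Int :=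
  match fD want (discount.getD k "") with
  | some j => items.set j.toNat (items.getD j.toNat 0 + 1)
  | none => items

theorem dec10_length (want discount : List String) (items : List Int) (k : Nat) :
    (dec10 want discount items k).length = items.length := by
  unfold dec10; split <;> [skip; rfl]
  cases fD want (discount.getD (k - 10) "") <;> simp

theorem inc0_length (want discount : List String) (items : List Int) (k : Nat) :
    (inc0 want discount items k).length = items.length := by
  unfold inc0; cases fD want (discount.getD k "") <;> simp

theorem stepA_char (want : List String) (number : List Int) (discount : List String)
    (k : Nat) (a : Int) (items : List Int) (hkm : k < discount.length) :
    solutionStep number (wdict want) discount (a, daysAt want discount k, items) (k : Int)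
      = (if inc0 want discount (dec10 want discount items k) k = number then a + 1 else a,
         daysAt want discount (k + 1),
         inc0 want discount (dec10 want discount items k) k) := by
  unfold solutionStep
  simp only []
  have phase1 :
      (if ((k : Int) - 10 ≥ 0 ∧ PySem.List.pyGetD (daysAt want discount k) ((k : Int) - 10) (-1) > -1) then
        PySem.List.pySetD items (PySem.List.pyGetD (daysAt want discount k) ((k : Int) - 10) (-1))
          (PySem.List.pyGetD items (PySem.List.pyGetD (daysAt want discount k) ((k : Int) - 10) (-1)) 0 - 1)
      else items) = dec10 want discount items k := by
    by_cases h10 : 10 ≤ k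
    · have hidx : ((k : Int) - 10) = ((k - 10 : Nat) : Int) := by omega
      rw [hidx, PySem.List.pyGetD_natCast,
        daysAt_getD want discount k (k - 10) (by omega) (by omega)]
      unfold gD dec10
      cases hj1 : fD want (discount.getD (k - 10) "") with
      | none =>
        simp only [Option.getD_none]
        rw [if_neg (by omega), if_pos h10]
      | some j1 =>
        obtain ⟨hj1a, hj1b⟩ := wdict_values want _ _ hj1
        simp only [Option.getD_some]
        rw [if_pos ⟨by omega, by omega⟩, if_pos h10]
        rw [show j1 = ((j1.toNat : Nat) : Int) from by omega]
        rw [PySem.List.pySetD_natCast, PySem.List.pyGetD_natCast]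
        simp only [Int.toNat_natCast]
    · rw [if_neg (by intro hc; omega), dec10, if_neg h10]
  rw [phase1]
  have hdk : PySem.List.pyGetD discount (k : Int) "" = discount.getD k "" :=
    PySem.List.pyGetD_natCast discount k ""
  rw [hdk]
  have phase2 :
      (if (wdict want).contains (discount.getD k "") = true then
        (PySem.List.pySetD (daysAt want discount k) (k : Int)
           ((wdict want).getD (discount.getD k "") 0),
         PySem.List.pySetD (dec10 want discount items k)
           ((wdict want).getD (discount.getD k "") 0)
           (PySem.List.pyGetD (dec10 want discount items k)
             ((wdict want).getD (discount.getD k "") 0) 0 + 1))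
      else (daysAt want discount k, dec10 want discount items k))
      = (daysAt want discount (k + 1),
         inc0 want discount (dec10 want discount items k) k) := by
    have hcont : (wdict want).contains (discount.getD k "")
        = (fD want (discount.getD k "")).isSome := by
      rw [PySem.Dict.contains_eq_isSome_get?]; rfl
    cases hj2 : fD want (discount.getD k "") with
    | none =>
      rw [if_neg (by rw [hcont, hj2]; simp)]
      rw [daysAt_succ_none want discount k (by unfold gD; rw [hj2]; rfl)]
      rw [show inc0 want discount (dec10 want discount items k) k
          = dec10 want discount items k from by unfold inc0; rw [hj2]]
    | some j2 =>
      obtain ⟨hj2a, hj2b⟩ := wdict_values want _ _ hj2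
      rw [if_pos (by rw [hcont, hj2]; rfl)]
      have hgetD : (wdict want).getD (discount.getD k "") 0 = j2 := by
        rw [PySem.Dict.getD_eq_get?_getD]
        rw [show (wdict want).get? (discount.getD k "") = some j2 from hj2]
        rfl
      rw [hgetD]
      have hdays : PySem.List.pySetD (daysAt want discount k) (k : Int) j2
          = daysAt want discount (k + 1) := by
        rw [PySem.List.pySetD_natCast]
        rw [show j2 = gD want discount k from by unfold gD; rw [hj2]; rfl]
        exact daysAt_succ_set want discount k hkm
      rw [hdays]
      rw [show PySem.List.pySetD (dec10 want discount items k) j2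
            (PySem.List.pyGetD (dec10 want discount items k) j2 0 + 1)
          = inc0 want discount (dec10 want discount items k) k from by
        unfold inc0
        rw [hj2]
        rw [show j2 = ((j2.toNat : Nat) : Int) from by omega]
        rw [PySem.List.pySetD_natCast, PySem.List.pyGetD_natCast]
        simp only [Int.toNat_natCast]]
  rw [phase2]

theorem stepB_char (want : List String) (number : List Int) (discount : List String)
    (k : Nat) (a : Int) (items : List Int)
    (hitems : items.length = want.length) (hn : number.length = want.length) :
    altStep number (wdict want)
        (a, winAt want discount k, items, badCount items number) (discount.getD k "")
      = (if badCount (inc0 want discount (dec10 want discount items k) k) number = 0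
            then a + 1 else a,
         winAt want discount (k + 1),
         inc0 want discount (dec10 want discount items k) k,
         badCount (inc0 want discount (dec10 want discount items k) k) number) := by
  unfold altStep
  simp only []
  have phase1 :
      (if (winAt want discount k).length = 10 then
        match winAt want discount k with
        | [] => (winAt want discount k, items, badCount items number)
        | old :: rest =>
          match old with
          | some j =>
            let r := altBump number items (badCount items number) j (-1)
            (rest, r.1, r.2)
          | none => (rest, items, badCount items number)
      else (winAt want discount k, items, badCount items number))
      = ((List.range' (k - 9) (min k 9)).map (fun j => fD want (discount.getD j "")),
         dec10 want discount items k,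
         badCount (dec10 want discount items k) number) := by
    by_cases h10 : 10 ≤ k
    · have hmin9 : min k 9 = 9 := by omega
      rw [hmin9, winAt_cons want discount k h10]
      rw [if_pos (by simp)]
      unfold dec10
      rw [if_pos h10]
      cases hj1 : fD want (discount.getD (k - 10) "") with
      | none => rfl
      | some j1 =>
        obtain ⟨hj1a, hj1b⟩ := wdict_values want _ _ hj1
        simp only []
        rw [show j1 = ((j1.toNat : Nat) : Int) from by omega]
        rw [altBump_eq number items (badCount items number) j1.toNat (-1)
          (by omega) (by omega)]
        rw [show items.getD j1.toNat 0 + (-1) = items.getD j1.toNat 0 - 1 from by ring]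
        rw [show badCount items number
              + badCount (items.set j1.toNat (items.getD j1.toNat 0 - 1)) number
              - badCount items number
            = badCount (items.set j1.toNat (items.getD j1.toNat 0 - 1)) number from by ring]
        simp only [Int.toNat_natCast]
    · rw [if_neg (by rw [winAt_len]; omega)]
      unfold winAt dec10
      rw [if_neg h10,
        show k - 10 = k - 9 from by omega,
        show min k 10 = min k 9 from by omega]
  rw [phase1]
  simp only []
  rw [show (wdict want).get? (discount.getD k "") = fD want (discount.getD k "") from rfl]
  cases hj2 : fD want (discount.getD k "") with
  | none =>
    simp only []
    rw [show inc0 want discount (dec10 want discount items k) k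
        = dec10 want discount items k from by unfold inc0; rw [hj2]]
    rw [show ((List.range' (k - 9) (min k 9)).map (fun j => fD want (discount.getD j "")))
          ++ [(none : Option Int)]
        = winAt want discount (k + 1) from by
      rw [← winAt_succ want discount k, ← hj2]]
  | some j2 =>
    obtain ⟨hj2a, hj2b⟩ := wdict_values want _ _ hj2
    simp only []
    have hd10 : (dec10 want discount items k).length = items.length :=
      dec10_length want discount items k
    simp only [altBump_eq' number (dec10 want discount items k)
      (badCount (dec10 want discount items k) number) j2 1 hj2a (by omega) (by omega)]
    simp only [show (dec10 want discount items k).set j2.toNat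
          ((dec10 want discount items k).getD j2.toNat 0 + 1)
        = inc0 want discount (dec10 want discount items k) k from by
      unfold inc0
      rw [hj2]]
    simp only [add_sub_cancel_left]
    rw [show ((List.range' (k - 9) (min k 9)).map (fun j => fD want (discount.getD j "")))
          ++ [some j2]
        = winAt want discount (k + 1) from by
      rw [← winAt_succ want discount k, ← hj2]]

theorem mainLoop (want : List String) (number : List Int) (discount : List String)
    (hn : number.length = want.length) :
    ∀ (fuel k : Nat) (a : Int) (items : List Int),
      k + fuel = discount.length → items.length = want.length →
      ((PySem.List.pyRange (k : Int) (discount.length : Int) 1).foldl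
          (solutionStep number (wdict want) discount)
          (a, daysAt want discount k, items)).1
        = ((discount.drop k).foldl (altStep number (wdict want))
            (a, winAt want discount k, items, badCount items number)).1 := by
  intro fuel
  induction fuel with
  | zero =>
    intro k a items hk hitems
    have hkm : k = discount.length := by omega
    subst hkm
    rw [PySem.List.pyRange_one_eq_nil (le_refl _), List.drop_length]
    rfl
  | succ fuel ih =>
    intro k a items hk hitems
    have hkm : k < discount.length := by omega
    rw [PySem.List.pyRange_one_cons (by exact_mod_cast hkm)]
    rw [show ((k : Int) + 1) = (((k + 1 : Nat)) : Int) from by push_cast; ring]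
    rw [List.foldl_cons]
    rw [List.drop_eq_getElem_cons hkm, List.foldl_cons]
    rw [show discount[k] = discount.getD k "" from (List.getD_eq_getElem discount "" hkm).symm]
    rw [stepA_char want number discount k a items hkm]
    rw [stepB_char want number discount k a items hitems hn]
    have hlen2 : (inc0 want discount (dec10 want discount items k) k).length = want.length := by
      rw [inc0_length, dec10_length, hitems]
    simp only [badCount_eq_zero
      (inc0 want discount (dec10 want discount items k) k) number (by omega)]
    exact ih (k + 1) _ _ (by omega) hlen2

-- ===== VERDICT (by name: the statement is the Claim_ definition above) =====
theorem solution_spec : Claim_equal_solution := by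
  unfold Claim_equal_solution
  intro want number discount _hdom
  unfold Spec_solution solution solution_alt
  simp only []
  by_cases hn : number.length = want.length
  · rw [if_neg (by simp [hn])]
    rw [posFold_eq_wdict]
    have hwd : (PySem.List.pyRange 0 (want.length : Int) 1).foldl
        (fun d i => d.insert (PySem.List.pyGetD want i "") i) PySem.Dict.empty = wdict want := rfl
    rw [hwd]
    have hbad : (PySem.List.pyRange 0 (want.length : Int) 1).foldl
        (fun acc j => if PySem.List.pyGetD (List.replicate want.length (0 : Int)) j 0
            ≠ PySem.List.pyGetD number j 0 then acc + 1 else acc) (0 : Int)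
        = badCount (List.replicate want.length (0 : Int)) number := by
      rw [PySem.List.pyRange_one, List.foldl_map]
      simp only [zero_add, Int.sub_zero, Int.toNat_natCast, PySem.List.pyGetD_natCast]
      have h := initBad (List.replicate want.length (0 : Int)) number 0
        (by rw [List.length_replicate, hn])
      rw [List.length_replicate] at h
      rw [show (List.foldl (fun acc j => if (List.replicate want.length (0:Int)).getD j 0
            ≠ number.getD j 0 then acc + 1 else acc) 0 (List.range want.length))
          = 0 + badCount (List.replicate want.length (0 : Int)) number from h]
      ring
    rw [hbad]
    have h0 := mainLoop want number discount hn discount.length 0 0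
      (List.replicate want.length (0 : Int)) (by omega) (by simp)
    rw [daysAt_zero, winAt_zero] at h0
    simpa using h0
  · rw [if_pos (by simp [hn])]
    rw [foldA_const number _ discount _ 0 _ _ (by simp; omega)]
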